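-- pv_equiv track=rewrite | github.com/akonoroshi/dialign_python | dialign_python/conversation.py | _compare_precomputed
-- ===== SOURCE A (Python) =====
-- from collections import Counter
-- from typing import Dict, List, Any, Set
--
-- def _compare_precomputed(
--                          n_gram_set: List[str],
--                          past_n_grams: List[str],
--                          current_counts: Counter | None = None,
--                          past_counts: Counter | None = None,
--                          current_set: set[str] | None = None,
--                          past_set: set[str] | None = None) -> Dict[str, bool]:
--     if current_counts is None:
--         current_counts = Counter(n_gram_set)
--     if past_counts is None:
--         past_counts = Counter(past_n_grams)
--     if current_set is None:
--         current_set = set(n_gram_set)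
--     if past_set is None:
--         past_set = set(past_n_grams)
--
--     matching_n_grams = list(current_set & past_set)
--     free_form = [True] * len(matching_n_grams)
--
--     for i, n_gram in enumerate(matching_n_grams):
--         for another_n_gram in matching_n_grams:
--             if n_gram == another_n_gram:
--                 continue
--             if n_gram in another_n_gram:
--                 current_n_gram_count = current_counts[n_gram]
--                 current_another_n_gram_count = current_counts[another_n_gram]
--                 past_n_gram_count = past_counts[n_gram]
--                 past_another_n_gram_count = past_counts[another_n_gram]
--                 if current_n_gram_count == current_another_n_gram_count and past_n_gram_count == past_another_n_gram_count:
--                     free_form[i] = False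
--                     break
--
--     return {matching_n_gram: free_form[i] for i, matching_n_gram in enumerate(matching_n_grams)}
-- ===== SOURCE B (Python) =====
-- from collections import Counter
-- from typing import Dict, List
--
--
-- def _compare_precomputed(
--                          n_gram_set: List[str],
--                          past_n_grams: List[str],
--                          current_counts: Counter | None = None,
--                          past_counts: Counter | None = None,
--                          current_set: set[str] | None = None,
--                          past_set: set[str] | None = None) -> Dict[str, bool]:
--     if current_counts is None:
--         current_counts = Counter(n_gram_set)
--     if past_counts is None:
--         past_counts = Counter(past_n_grams)
--     if current_set is None:
--         current_set = set(n_gram_set)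
--     if past_set is None:
--         past_set = set(past_n_grams)
--
--     matching = list(current_set & past_set)
--     # Group the matching n-grams by their (current count, past count) pair once,
--     # so the substring test only runs inside each group.
--     keyed = [((current_counts.get(g, 0), past_counts.get(g, 0)), g) for g in matching]
--     groups: Dict[tuple, list] = {}
--     for key, g in keyed:
--         groups.setdefault(key, []).append(g)
--
--     return {g: not any(g != other and g in other for other in groups[key])
--             for key, g in keyed}
-- ===== Notes on version B (the rewrite author's own statement) =====
-- stated objective: alternative
-- what changed: Instead of A's nested scan over all matching n-grams with the count-equality test inside the inner loop, B groups the matching n-grams once by their (current count, past count) pair in a dict and runs the substring test only among members of the same group.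
import Mathlib
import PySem

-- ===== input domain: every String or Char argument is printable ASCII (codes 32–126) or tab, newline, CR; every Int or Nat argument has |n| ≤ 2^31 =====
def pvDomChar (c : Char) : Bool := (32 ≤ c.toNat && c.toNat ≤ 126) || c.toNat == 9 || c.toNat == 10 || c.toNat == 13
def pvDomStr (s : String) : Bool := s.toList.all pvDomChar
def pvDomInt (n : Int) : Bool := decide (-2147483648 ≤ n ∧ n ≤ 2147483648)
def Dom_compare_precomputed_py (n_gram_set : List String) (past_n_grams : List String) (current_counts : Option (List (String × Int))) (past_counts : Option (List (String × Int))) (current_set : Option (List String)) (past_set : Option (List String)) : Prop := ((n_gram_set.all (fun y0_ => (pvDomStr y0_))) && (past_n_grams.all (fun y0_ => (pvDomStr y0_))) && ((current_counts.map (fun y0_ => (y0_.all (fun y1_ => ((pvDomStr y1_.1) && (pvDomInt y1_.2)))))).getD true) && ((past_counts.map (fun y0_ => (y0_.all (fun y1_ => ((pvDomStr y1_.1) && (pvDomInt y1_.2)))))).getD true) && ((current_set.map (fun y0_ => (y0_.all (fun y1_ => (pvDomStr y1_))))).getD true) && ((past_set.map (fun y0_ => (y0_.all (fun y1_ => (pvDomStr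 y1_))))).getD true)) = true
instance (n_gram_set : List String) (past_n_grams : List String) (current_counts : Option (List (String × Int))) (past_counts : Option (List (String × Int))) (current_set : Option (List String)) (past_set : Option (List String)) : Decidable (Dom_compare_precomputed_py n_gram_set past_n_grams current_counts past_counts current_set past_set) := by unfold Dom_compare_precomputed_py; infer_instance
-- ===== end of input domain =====

-- ===== PORT A =====
-- B groups matching n-grams by their (current,past) count pair so the substring scan
-- runs only within a group, instead of A's full quadratic scan with count checks inline. (objective: alternative)

-- inner 'for another_n_gram in matching' loop of A, with its break (returns True at the first hit);
-- Counter lookup d[k] returns 0 on a missing key, hence getD _ 0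
def pvA_found (cc pc : PySem.Dict String Int) (n : String) : List String → Bool
  | [] => false
  | a :: rest =>
    if n == a then pvA_found cc pc n rest
    else if PySem.Str.isIn n a then
      if cc.getD n 0 == cc.getD a 0 && pc.getD n 0 == pc.getD a 0 then true
      else pvA_found cc pc n rest
    else pvA_found cc pc n rest

def compare_precomputed_py (n_gram_set : List String) (past_n_grams : List String) (current_counts : Option (List (String × Int))) (past_counts : Option (List (String × Int))) (current_set : Option (List String)) (past_set : Option (List String)) : List (String × Bool) :=
  let cc := match current_counts with
    | some l => PySem.Dict.mk l
    | none => PySem.Dict.counter n_gram_set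
  let pc := match past_counts with
    | some l => PySem.Dict.mk l
    | none => PySem.Dict.counter past_n_grams
  let cs := match current_set with
    | some s => s
    | none => PySem.Set.ofList n_gram_set
  let ps := match past_set with
    | some s => s
    | none => PySem.Set.ofList past_n_grams
  let matching := PySem.Set.inter cs ps
  let free_form := matching.map (fun n => !pvA_found cc pc n matching)
  ((matching.zip free_form).foldl (fun d p => d.insert p.1 p.2) PySem.Dict.empty).items

-- ===== PORT B =====
def compare_precomputed_py_alt (n_gram_set : List String) (past_n_grams : List String) (current_counts : Option (List (String × Int))) (past_counts : Option (List (String × Int))) (current_set : Option (List String)) (past_set : Option (List String)) : List (String × Bool) :=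
  let cc := match current_counts with
    | some l => PySem.Dict.mk l
    | none => PySem.Dict.counter n_gram_set
  let pc := match past_counts with
    | some l => PySem.Dict.mk l
    | none => PySem.Dict.counter past_n_grams
  let cs := match current_set with
    | some s => s
    | none => PySem.Set.ofList n_gram_set
  let ps := match past_set with
    | some s => s
    | none => PySem.Set.ofList past_n_grams
  let matching := PySem.Set.inter cs ps
  let keyed := matching.map (fun g => ((cc.getD g 0, pc.getD g 0), g))
  let groups := keyed.foldl (fun d p => d.modify p.1 ([] : List String) (fun l => l ++ [p.2])) PySem.Dict.empty
  (keyed.foldl (fun d p => d.insert p.2 (!((groups.getD p.1 []).any (fun a => p.2 != a && PySem.Str.isIn p.2 a))) ) PySem.Dict.empty).items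

-- ===== PRECONDITION & SPEC =====
-- Pre_ excludes exactly the inputs on which A raises: when a counts mapping is passed
-- explicitly (under this task's calling convention it is a plain dict, whose d[k] raises
-- KeyError on a missing key, unlike a Counter) and it is missing a key for one member of a
-- substring-related pair of shared n-grams, A's inline d[k] lookups raise KeyError there;
-- which raising pair A reaches first depends on Python's set-iteration order, so every
-- such input is excluded. B's .get(k, 0) returns a value instead.
def Pre_compare_precomputed_py (n_gram_set : List String) (past_n_grams : List String) (current_counts : Option (List (String × Int))) (past_counts : Option (List (String × Int))) (current_set : Option (List String)) (past_set : Option (List String)) : Prop :=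
  ∀ g ∈ PySem.Set.inter (current_set.getD (PySem.Set.ofList n_gram_set)) (past_set.getD (PySem.Set.ofList past_n_grams)),
    ∀ h ∈ PySem.Set.inter (current_set.getD (PySem.Set.ofList n_gram_set)) (past_set.getD (PySem.Set.ofList past_n_grams)),
      g ≠ h → PySem.Str.isIn g h = true →
        ((current_counts.all fun l => decide (g ∈ l.map Prod.fst) && decide (h ∈ l.map Prod.fst)) &&
         (past_counts.all fun l => decide (g ∈ l.map Prod.fst) && decide (h ∈ l.map Prod.fst))) = true
instance (n_gram_set : List String) (past_n_grams : List String) (current_counts : Option (List (String × Int))) (past_counts : Option (List (String × Int))) (current_set : Option (List String)) (past_set : Option (List String)) : Decidable (Pre_compare_precomputed_py n_gram_set past_n_grams current_counts past_counts current_set past_set) := by unfold Pre_compare_precomputed_py; infer_instance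
def pvWitness_compare_precomputed_py : List String × List String × (Option (List (String × Int))) × (Option (List (String × Int))) × Option (List String) × Option (List String) := (["a"], ["a"], none, none, none, none)
def Spec_compare_precomputed_py (n_gram_set : List String) (past_n_grams : List String) (current_counts : Option (List (String × Int))) (past_counts : Option (List (String × Int))) (current_set : Option (List String)) (past_set : Option (List String)) (out : List (String × Bool)) : Prop := out = compare_precomputed_py_alt n_gram_set past_n_grams current_counts past_counts current_set past_set
instance (n_gram_set : List String) (past_n_grams : List String) (current_counts : Option (List (String × Int))) (past_counts : Option (List (String × Int))) (current_set : Option (List String)) (past_set : Option (List String)) (out : List (String × Bool)) : Decidable (Spec_compare_precomputed_py n_gram_set past_n_grams current_counts past_counts current_set past_set out) := by unfold Spec_compare_precomputed_py; infer_instance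

-- ===== CLAIM (what is proved, stated in full; the proofs are below) =====
def Claim_equal_compare_precomputed_py : Prop := ∀ (n_gram_set : List String) (past_n_grams : List String) (current_counts : Option (List (String × Int))) (past_counts : Option (List (String × Int))) (current_set : Option (List String)) (past_set : Option (List String)), Dom_compare_precomputed_py n_gram_set past_n_grams current_counts past_counts current_set past_set → Pre_compare_precomputed_py n_gram_set past_n_grams current_counts past_counts current_set past_set → Spec_compare_precomputed_py n_gram_set past_n_grams current_counts past_counts current_set past_set (compare_precomputed_py n_gram_set past_n_grams current_counts past_counts current_set past_set)

-- ===== LEMMAS AND PROOFS =====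

-- A's inner loop is an 'any' over the matching list
theorem pvA_found_eq_any (cc pc : PySem.Dict String Int) (n : String) (l : List String) :
    pvA_found cc pc n l
      = l.any (fun a => !(n == a) && (PySem.Str.isIn n a && (cc.getD n 0 == cc.getD a 0 && pc.getD n 0 == pc.getD a 0))) := by
  induction l with
  | nil => rfl
  | cons a rest ih =>
    simp only [pvA_found, List.any_cons]
    by_cases h1 : n == a
    · simp [h1, ih]
    · by_cases h2 : PySem.Str.isIn n a <;> simp only [PySem.Str.isIn_eq] at h2
      · by_cases h3 : (cc.getD n 0 == cc.getD a 0 && pc.getD n 0 == pc.getD a 0) = true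
        · simp [h1, h2, h3]
        · simp [h1, h2, h3, ih]
      · simp [h1, h2, ih]

-- the per-element flags of the two programs agree
theorem pv_flag_eq (cc pc : PySem.Dict String Int) (matching : List String) (g : String) :
    (!pvA_found cc pc g matching)
      = (!(((matching.map (fun g => ((cc.getD g 0, pc.getD g 0), g))).foldl
              (fun d p => d.modify p.1 ([] : List String) (fun l => l ++ [p.2])) PySem.Dict.empty).getD
              (cc.getD g 0, pc.getD g 0) []).any
            (fun a => g != a && PySem.Str.isIn g a)) := by
  rw [PySem.Dict.getD_foldl_modify_append, pvA_found_eq_any]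
  simp only [PySem.Dict.getD_empty, List.nil_append, List.filter_map, List.map_map,
    Function.comp_def, List.any_map, List.any_filter]
  refine congrArg (fun b => !b) (congrArg matching.any (funext fun a => ?_))
  by_cases h1 : g = a <;> by_cases h2 : cc.getD g 0 = cc.getD a 0 <;>
    by_cases h3 : pc.getD g 0 = pc.getD a 0 <;>
      simp [bne, BEq.beq, h1, h2, h3, eq_comm]

-- the whole bodies agree, for any counters and any matching list
theorem pv_main (cc pc : PySem.Dict String Int) (matching : List String) :
    (((matching.zip (matching.map (fun n => !pvA_found cc pc n matching))).foldl
        (fun (d : PySem.Dict String Bool) p => d.insert p.1 p.2) PySem.Dict.empty).items)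
      = (((matching.map (fun g => ((cc.getD g 0, pc.getD g 0), g))).foldl
          (fun (d : PySem.Dict String Bool) p => d.insert p.2
            (!(((matching.map (fun g => ((cc.getD g 0, pc.getD g 0), g))).foldl
                 (fun d2 p2 => d2.modify p2.1 ([] : List String) (fun l => l ++ [p2.2])) PySem.Dict.empty).getD p.1 []).any
               (fun a => p.2 != a && PySem.Str.isIn p.2 a))) PySem.Dict.empty).items) := by
  apply congrArg PySem.Dict.items
  rw [← List.foldl_map (f := fun p : (Int × Int) × String => (p.2,
        (!(((matching.map (fun g => ((cc.getD g 0, pc.getD g 0), g))).foldl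
             (fun d2 p2 => d2.modify p2.1 ([] : List String) (fun l => l ++ [p2.2])) PySem.Dict.empty).getD p.1 []).any
           (fun a => p.2 != a && PySem.Str.isIn p.2 a))))
      (g := fun (d : PySem.Dict String Bool) p => d.insert p.1 p.2)]
  apply congrArg
  have hz : matching.zip (matching.map (fun n => !pvA_found cc pc n matching))
      = matching.map (fun n => (n, !pvA_found cc pc n matching)) := by
    have := List.zip_map' (f := fun n : String => n) (g := fun n => !pvA_found cc pc n matching) (l := matching)
    simpa using this
  rw [hz, List.map_map]
  exact List.map_congr_left (fun g _ => by
    simp only [Function.comp_apply]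
    exact congrArg (fun b => (g, b)) (pv_flag_eq cc pc matching g))

-- ===== VERDICT (by name: the statement is the Claim_ definition above) =====
theorem compare_precomputed_py_spec : Claim_equal_compare_precomputed_py := by
  intro n_gram_set past_n_grams current_counts past_counts current_set past_set _ _
  unfold Spec_compare_precomputed_py compare_precomputed_py compare_precomputed_py_alt
  exact pv_main _ _ _
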